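-- pv_equiv track=rewrite | github.com/daviddoret/punctilious | sandbox/test3.py | _calculate_lexicographic_position
-- ===== SOURCE A (Python) =====
-- from typing import List, Tuple
-- import math
--
-- def _count_sequences_with_exact_length_and_sum(length: int, target_sum: int = None) -> int:
--     """
--     Counts sequences with exact length and optionally exact sum.
--     If target_sum is None, counts all sequences of the given length.
--
--     This uses the stars and bars combinatorial method:
--     Number of ways to distribute n identical items into k distinct bins
--     is C(n + k - 1, k - 1).
--     """
--     if length == 0:
--         return 1 if target_sum is None or target_sum == 0 else 0
--
--     if target_sum is None:
--         # Count all sequences of given length - this grows very quickly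
--         # We use a practical upper bound for computation
--         count = 0
--         max_reasonable_sum = 50  # Practical limit to prevent infinite computation
--         for s in range(max_reasonable_sum):
--             count += math.comb(s + length - 1, length - 1)
--         return count
--
--     if target_sum < 0:
--         return 0
--
--     return math.comb(target_sum + length - 1, length - 1)
--
-- def _calculate_lexicographic_position(sequence: List[int], total_sum: int) -> int:
--     """
--     Calculates the lexicographic position of a sequence among all sequences
--     with the same length and sum.
--     """
--     length = len(sequence)
--     position = 0
--     remaining_sum = total_sum
--
--     for i in range(length):
--         # Count sequences that start with values less than sequence[i]
--         # and can complete to the same total sum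
--         for val in range(sequence[i]):
--             remaining_positions = length - i - 1
--             remaining_after_val = remaining_sum - val
--
--             if remaining_after_val >= 0:
--                 if remaining_positions == 0:
--                     position += 1 if remaining_after_val == 0 else 0
--                 else:
--                     position += _count_sequences_with_exact_length_and_sum(
--                         remaining_positions, remaining_after_val
--                     )
--
--         remaining_sum -= sequence[i]
--
--     return position
-- ===== SOURCE B (Python) =====
-- import math
--
--
-- def _choose(n: int, k: int) -> int:
--     return math.comb(n, k) if 0 <= k <= n else 0
--
--
-- def _calculate_lexicographic_position(sequence, total_sum):
--     """Closed-form per position via the hockey-stick identity: the inner sum of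
--     binomials collapses to a difference of two binomial coefficients."""
--     length = len(sequence)
--     position = 0
--     rem = total_sum
--     for i, v in enumerate(sequence):
--         k = length - i - 1
--         m = min(v, rem + 1) if rem >= 0 and v > 0 else 0
--         if m > 0:
--             position += _choose(rem + k, k) - _choose(rem - m + k, k)
--         rem -= v
--     return position
-- ===== Notes on version B (the rewrite author's own statement) =====
-- stated objective: faster
-- what changed: The inner loop over range(sequence[i]) of stars-and-bars binomials is collapsed to a single closed-form difference of two binomial coefficients via the hockey-stick identity, making one constant-work step per position.
import Mathlib
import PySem

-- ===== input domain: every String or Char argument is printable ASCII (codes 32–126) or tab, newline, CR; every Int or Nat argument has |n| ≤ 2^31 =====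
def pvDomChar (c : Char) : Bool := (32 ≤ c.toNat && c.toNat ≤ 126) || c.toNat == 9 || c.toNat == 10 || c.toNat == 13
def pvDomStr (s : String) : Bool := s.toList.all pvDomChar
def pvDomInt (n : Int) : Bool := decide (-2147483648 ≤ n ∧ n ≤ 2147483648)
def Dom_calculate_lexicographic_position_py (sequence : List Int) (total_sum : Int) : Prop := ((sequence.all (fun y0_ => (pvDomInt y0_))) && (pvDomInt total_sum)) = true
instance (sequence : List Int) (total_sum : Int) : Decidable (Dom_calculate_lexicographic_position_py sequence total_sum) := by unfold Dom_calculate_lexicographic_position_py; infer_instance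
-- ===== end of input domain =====

-- B collapses A's inner loop of binomials into one hockey-stick closed form per position (objective: faster).

-- ===== PORT A =====
-- math.comb(n, k); A only calls it with 0 ≤ k ≤ n, where toNat is exact.
def pycombA (n k : Int) : Int := (Nat.choose n.toNat k.toNat : Int)

-- _count_sequences_with_exact_length_and_sum, ported for the target_sum-given path
-- (the entry function always passes a target_sum, so the None branch is never taken).
def countSeqA (length target_sum : Int) : Int :=
  if length = 0 then (if target_sum = 0 then 1 else 0)
  else if target_sum < 0 then 0
  else pycombA (target_sum + length - 1) (length - 1)

def calculate_lexicographic_position_py (sequence : List Int) (total_sum : Int) : Int :=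
  let length : Int := sequence.length
  let st := (PySem.List.enumerate sequence).foldl
    (fun (st : Int × Int) p =>
      let position := (PySem.List.pyRange 0 p.2 1).foldl
        (fun pos val =>
          if 0 ≤ st.2 - val then
            if length - p.1 - 1 = 0 then
              pos + (if st.2 - val = 0 then 1 else 0)
            else
              pos + countSeqA (length - p.1 - 1) (st.2 - val)
          else pos) st.1
      (position, st.2 - p.2)) (0, total_sum)
  st.1

-- ===== PORT B =====
-- _choose: math.comb guarded to 0 outside 0 ≤ k ≤ n.
def chooseB (n k : Int) : Int := if 0 ≤ k ∧ k ≤ n then (Nat.choose n.toNat k.toNat : Int) else 0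

def calculate_lexicographic_position_py_alt (sequence : List Int) (total_sum : Int) : Int :=
  let length : Int := sequence.length
  let st := (PySem.List.enumerate sequence).foldl
    (fun (st : Int × Int) p =>
      let k := length - p.1 - 1
      let m := if 0 ≤ st.2 ∧ 0 < p.2 then min p.2 (st.2 + 1) else 0
      let position := if 0 < m then st.1 + (chooseB (st.2 + k) k - chooseB (st.2 - m + k) k) else st.1
      (position, st.2 - p.2)) (0, total_sum)
  st.1

-- ===== PRECONDITION & SPEC =====
def Spec_calculate_lexicographic_position_py (sequence : List Int) (total_sum : Int) (out : Int) : Prop := out = calculate_lexicographic_position_py_alt sequence total_sum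
instance (sequence : List Int) (total_sum : Int) (out : Int) : Decidable (Spec_calculate_lexicographic_position_py sequence total_sum out) := by unfold Spec_calculate_lexicographic_position_py; infer_instance

-- ===== CLAIM (what is proved, stated in full; the proofs are below) =====
def Claim_equal_calculate_lexicographic_position_py : Prop := ∀ (sequence : List Int) (total_sum : Int), Dom_calculate_lexicographic_position_py sequence total_sum → Spec_calculate_lexicographic_position_py sequence total_sum (calculate_lexicographic_position_py sequence total_sum)

-- ===== LEMMAS AND PROOFS =====

-- the guarded binomial agrees with the raw one on nonnegative arguments
theorem chooseB_eq_choose {n k : Int} (hn : 0 ≤ n) (hk : 0 ≤ k) :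
    chooseB n k = (Nat.choose n.toNat k.toNat : Int) := by
  unfold chooseB
  by_cases h : k ≤ n
  · simp [hk, h]
  · have hlt : n.toNat < k.toNat := by omega
    simp [hk, h, Nat.choose_eq_zero_of_lt hlt]

-- Pascal's rule for the guarded binomial, valid for every n when 1 ≤ k
theorem chooseB_pascal (n k : Int) (hk : 1 ≤ k) :
    chooseB n k = chooseB (n - 1) k + chooseB (n - 1) (k - 1) := by
  by_cases hn : k ≤ n
  · have hN : n.toNat = (n - 1).toNat + 1 := by omega
    have hK : k.toNat = (k - 1).toNat + 1 := by omega
    have h1 : chooseB n k = (Nat.choose ((n-1).toNat + 1) ((k-1).toNat + 1) : Int) := by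
      rw [chooseB_eq_choose (by omega) (by omega), hN, hK]
    have h2 : chooseB (n - 1) k = (Nat.choose (n-1).toNat k.toNat : Int) :=
      chooseB_eq_choose (by omega) (by omega)
    have h3 : chooseB (n - 1) (k - 1) = (Nat.choose (n-1).toNat (k-1).toNat : Int) :=
      chooseB_eq_choose (by omega) (by omega)
    rw [h1, h2, h3, Nat.choose_succ_succ', hK]
    push_cast; ring
  · have z1 : chooseB n k = 0 := by unfold chooseB; rw [if_neg (by omega)]
    have z2 : chooseB (n - 1) k = 0 := by unfold chooseB; rw [if_neg (by omega)]
    have z3 : chooseB (n - 1) (k - 1) = 0 := by unfold chooseB; rw [if_neg (by omega)]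
    omega

-- A's count for remaining positions k ≥ 1 is the guarded binomial
theorem countSeqA_eq_chooseB (k t : Int) (hk : 1 ≤ k) (ht : 0 ≤ t) :
    countSeqA k t = chooseB (t + k - 1) (k - 1) := by
  unfold countSeqA pycombA
  rw [chooseB_eq_choose (by omega) (by omega)]
  simp [show k ≠ 0 from by omega, show ¬ t < 0 from by omega]

-- number of first values val ∈ [0, v) that leave a nonnegative remainder
def mOf (v rem : Int) : Int := max 0 (min v (rem + 1))

-- one telescoping step of the closed form = A's contribution for val = j
theorem inner_step (k rem j : Int) (hk : 0 ≤ k) (hj : 0 ≤ j) :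
    chooseB (rem - mOf j rem + k) k - chooseB (rem - mOf (j+1) rem + k) k
      = (if 0 ≤ rem - j then
          (if k = 0 then (if rem - j = 0 then 1 else 0) else countSeqA k (rem - j))
         else 0) := by
  by_cases hrj : 0 ≤ rem - j
  · have hm0 : mOf j rem = j := by unfold mOf; omega
    have hm1 : mOf (j+1) rem = j + 1 := by unfold mOf; omega
    rw [hm0, hm1, if_pos hrj]
    by_cases hk0 : k = 0
    · subst hk0
      by_cases he : rem - j = 0
      · rw [if_pos he,
            show rem - j + 0 = (0:Int) from by omega,
            show rem - (j + 1) + 0 = (-1:Int) from by omega,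
            if_pos rfl]
        decide
      · rw [if_neg he]
        have e1 : chooseB (rem - j + 0) 0 = 1 := by
          unfold chooseB; rw [if_pos ⟨le_refl 0, by omega⟩]; simp
        have e2 : chooseB (rem - (j + 1) + 0) 0 = 1 := by
          unfold chooseB; rw [if_pos ⟨le_refl 0, by omega⟩]; simp
        omega
    · have hk1 : 1 ≤ k := by omega
      rw [if_neg hk0, countSeqA_eq_chooseB k (rem - j) hk1 hrj,
          chooseB_pascal (rem - j + k) k hk1,
          show rem - (j + 1) + k = rem - j + k - 1 from by ring]
      ring
  · have hm : mOf (j+1) rem = mOf j rem := by unfold mOf; omega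
    rw [hm, if_neg hrj]; ring

-- closed form for A's whole inner loop (k = remaining positions, V = sequence[i] clamped to ℕ)
theorem innerA_closed (k rem : Int) (hk : 0 ≤ k) (V : Nat) (pos : Int) :
    (PySem.List.pyRange 0 (V:Int) 1).foldl
      (fun pos val =>
        if 0 ≤ rem - val then
          if k = 0 then pos + (if rem - val = 0 then 1 else 0)
          else pos + countSeqA k (rem - val)
        else pos) pos
    = pos + (chooseB (rem + k) k - chooseB (rem - mOf (V:Int) rem + k) k) := by
  induction V with
  | zero =>
    rw [show ((0:Nat):Int) = 0 from rfl, PySem.List.pyRange_one_eq_nil (le_refl 0)]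
    have : mOf 0 rem = 0 := by unfold mOf; omega
    rw [this]; simp
  | succ n ih =>
    have hcast : ((n+1:Nat):Int) = (n:Int) + 1 := by push_cast; ring
    rw [hcast, PySem.List.pyRange_one_succ_right (by positivity), List.foldl_append, ih]
    simp only [List.foldl]
    have hstep := inner_step k rem (n:Int) hk (by positivity)
    by_cases hr : 0 ≤ rem - (n:Int)
    · rw [if_pos hr] at hstep ⊢
      by_cases hk0 : k = 0
      · rw [if_pos hk0] at hstep ⊢; omega
      · rw [if_neg hk0] at hstep ⊢; omega
    · rw [if_neg hr] at hstep ⊢; omega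

-- the two per-position steps agree whenever the remaining-positions count is ≥ 0
theorem step_eq (length i v : Int) (hi : 0 ≤ length - i - 1) (pos rem : Int) :
    ((PySem.List.pyRange 0 v 1).foldl
      (fun p val =>
        if 0 ≤ rem - val then
          if length - i - 1 = 0 then p + (if rem - val = 0 then 1 else 0)
          else p + countSeqA (length - i - 1) (rem - val)
        else p) pos)
    = (if 0 < (if 0 ≤ rem ∧ 0 < v then min v (rem + 1) else 0) then
        pos + (chooseB (rem + (length - i - 1)) (length - i - 1)
              - chooseB (rem - (if 0 ≤ rem ∧ 0 < v then min v (rem + 1) else 0) + (length - i - 1)) (length - i - 1))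
       else pos) := by
  set k := length - i - 1 with hkdef
  by_cases hv : v ≤ 0
  · rw [PySem.List.pyRange_one_eq_nil hv]
    have : (if 0 ≤ rem ∧ 0 < v then min v (rem + 1) else 0) = 0 := by
      have : ¬ (0 ≤ rem ∧ 0 < v) := by omega
      simp [this]
    rw [this]; simp
  · have hv' : 0 < v := by omega
    have hcast : v = ((v.toNat : Nat) : Int) := by omega
    rw [hcast, innerA_closed k rem hi v.toNat pos, ← hcast]
    by_cases hrem : 0 ≤ rem
    · have hcond : (0 ≤ rem ∧ 0 < v) := ⟨hrem, hv'⟩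
      have hm : mOf v rem = min v (rem + 1) := by unfold mOf; omega
      have hpos : 0 < min v (rem + 1) := by omega
      simp only [hcond, and_self, if_true, hm]
      rw [if_pos hpos]
    · have hcond : ¬ (0 ≤ rem ∧ 0 < v) := by omega
      have hm : mOf v rem = 0 := by unfold mOf; omega
      simp only [hcond, if_false, hm]
      simp

-- ===== VERDICT (by name: the statement is the Claim_ definition above) =====
theorem calculate_lexicographic_position_py_spec : Claim_equal_calculate_lexicographic_position_py := by
  intro sequence total_sum _
  unfold Spec_calculate_lexicographic_position_py
  unfold calculate_lexicographic_position_py calculate_lexicographic_position_py_alt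
  simp only []
  congr 1
  apply PySem.List.foldl_congr_mem
  intro st p hp
  rcases (PySem.List.mem_enumerate_iff _ _ _).1 hp with ⟨kk, hkk, hpk⟩
  have hi : 0 ≤ (sequence.length : Int) - p.1 - 1 := by
    subst hpk; simp; omega
  exact congrArg (fun x => (x, st.2 - p.2)) (step_eq (sequence.length) p.1 p.2 hi st.1 st.2)
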